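-- pv_equiv track=rewrite | github.com/kommodeskab/Roskilde-Projekt | raspberry.py | split_dict_by_max_length
-- ===== SOURCE A (Python) =====
-- def split_dict_by_max_length(input_dict : dict, max_length : int) -> list[dict]:
--     result = []
--     current_chunk = {}
--
--     for key, value in input_dict.items():
--         temp_chunk = current_chunk.copy()
--         temp_chunk[key] = value
--         if len(str(temp_chunk)) > max_length:
--             result.append(current_chunk)
--             current_chunk = {key: value}
--         else:
--             current_chunk = temp_chunk
--
--     if current_chunk:
--         result.append(current_chunk)
--
--     result = [str(chunk) for chunk in result]
--
--     return result
-- ===== SOURCE B (Python) =====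
-- def split_dict_by_max_length(input_dict: dict, max_length: int) -> list[str]:
--     # One pass; maintains the running str()-length of the current chunk
--     # incrementally instead of re-stringifying the growing chunk each step.
--     chunks = []        # finished chunks, each a list of "key-repr: value" item strings
--     items = []         # item strings of the current chunk
--     cur_len = 2        # len(str(current chunk)); "{}" has length 2
--     for key, value in input_dict.items():
--         s = f"{key!r}: {value}"
--         new_len = cur_len + len(s) + (0 if not items else 2)
--         if new_len > max_length:
--             chunks.append(items)
--             items = [s]
--             cur_len = 2 + len(s)
--         else:
--             items.append(s)
--             cur_len = new_len
--     if items: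
--         chunks.append(items)
--     return ["{" + ", ".join(c) + "}" for c in chunks]
-- ===== Notes on version B (the rewrite author's own statement) =====
-- stated objective: faster
-- what changed: B does one pass that maintains the running str()-length of the current chunk incrementally (building each 'key-repr: value' item string once) instead of A's copy-the-chunk-and-re-stringify on every element; Pre_ only excludes association lists with duplicate keys, which do not represent any Python dict input.
import Mathlib
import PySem

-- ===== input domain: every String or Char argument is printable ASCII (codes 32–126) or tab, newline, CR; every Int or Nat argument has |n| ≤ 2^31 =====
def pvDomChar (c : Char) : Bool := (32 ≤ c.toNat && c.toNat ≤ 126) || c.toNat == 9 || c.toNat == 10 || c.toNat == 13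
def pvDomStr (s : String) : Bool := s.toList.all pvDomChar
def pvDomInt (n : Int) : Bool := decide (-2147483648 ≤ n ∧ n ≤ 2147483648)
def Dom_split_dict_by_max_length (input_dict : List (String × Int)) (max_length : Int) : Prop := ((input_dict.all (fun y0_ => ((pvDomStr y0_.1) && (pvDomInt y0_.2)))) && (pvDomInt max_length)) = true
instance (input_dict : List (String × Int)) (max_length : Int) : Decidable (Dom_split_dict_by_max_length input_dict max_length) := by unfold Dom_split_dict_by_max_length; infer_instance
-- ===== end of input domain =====

-- B replaces A's copy-the-chunk-and-re-stringify step by a single pass that keeps the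
-- running str()-length of the current chunk incrementally (objective: faster).

-- Shared rendering helpers: Python's str() of a dict of str keys / int values,
-- hand-ported (PySem has no repr); exact for the ASCII-32..126 + tab/newline/CR domain,
-- where repr escapes exactly backslash, tab/newline/CR and the chosen quote.
def pvEscChar (q : Char) (c : Char) : List Char :=
  if c = '\\' then ['\\', '\\']
  else if c = Char.ofNat 9 then ['\\', 't']
  else if c = Char.ofNat 10 then ['\\', 'n']
  else if c = Char.ofNat 13 then ['\\', 'r']
  else if c = q then ['\\', q]
  else [c]

-- Python repr of a string: double quotes iff it contains ' and no "
def pvReprChars (l : List Char) : List Char :=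
  if '\'' ∈ l ∧ '\"' ∉ l then '\"' :: l.flatMap (pvEscChar '\"') ++ ['\"']
  else '\'' :: l.flatMap (pvEscChar '\'') ++ ['\'']

-- the "key-repr: value" piece of str(dict) for one item
def pvItem (p : String × Int) : List Char :=
  pvReprChars p.1.toList ++ [':', ' '] ++ PySem.Int.toChars p.2

-- "{" + ", ".join(pieces) + "}"
def pvRender (c : List (List Char)) : List Char :=
  '{' :: PySem.Chars.join [',', ' '] c ++ ['}']

-- str(dict), on the items list
def pvDictStr (l : List (String × Int)) : List Char := pvRender (l.map pvItem)

-- ===== PORT A =====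
def pvStepA (max_length : Int)
    (st : List (PySem.Dict String Int) × PySem.Dict String Int) (kv : String × Int) :
    List (PySem.Dict String Int) × PySem.Dict String Int :=
  let temp := st.2.insert kv.1 kv.2
  if ((pvDictStr temp.items).length : Int) > max_length then
    (st.1 ++ [st.2], PySem.Dict.empty.insert kv.1 kv.2)
  else (st.1, temp)

def split_dict_by_max_length (input_dict : List (String × Int)) (max_length : Int) : List String :=
  let st := input_dict.foldl (pvStepA max_length)
    (([] : List (PySem.Dict String Int)), PySem.Dict.empty)
  let result := if st.2.items.isEmpty then st.1 else st.1 ++ [st.2]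
  result.map (fun d => String.ofList (pvDictStr d.items))

-- ===== PORT B =====
def pvStepB (max_length : Int)
    (st : List (List (List Char)) × List (List Char) × Int) (kv : String × Int) :
    List (List (List Char)) × List (List Char) × Int :=
  let s := pvItem kv
  let newLen := st.2.2 + (s.length : Int) + (if st.2.1.isEmpty then 0 else 2)
  if newLen > max_length then (st.1 ++ [st.2.1], ([s], 2 + (s.length : Int)))
  else (st.1, (st.2.1 ++ [s], newLen))

def split_dict_by_max_length_alt (input_dict : List (String × Int)) (max_length : Int) : List String :=
  let st := input_dict.foldl (pvStepB max_length)
    (([] : List (List (List Char))), ([] : List (List Char)), (2 : Int))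
  let chunks := if st.2.1.isEmpty then st.1 else st.1 ++ [st.2.1]
  chunks.map (fun c => String.ofList (pvRender c))

-- ===== PRECONDITION & SPEC =====
-- Pre_ excludes association lists with duplicate keys: they do not represent any Python
-- dict input (dict keys are unique), so A's overwrite-in-place behaviour there is not a
-- behaviour of the Python program on any actual input.
def Pre_split_dict_by_max_length (input_dict : List (String × Int)) (max_length : Int) : Prop :=
  (input_dict.map Prod.fst).Nodup
instance (input_dict : List (String × Int)) (max_length : Int) : Decidable (Pre_split_dict_by_max_length input_dict max_length) := by unfold Pre_split_dict_by_max_length; infer_instance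

def pvWitness_split_dict_by_max_length : (List (String × Int)) × Int := ([("a", 1), ("bc", -2)], 12)

def Spec_split_dict_by_max_length (input_dict : List (String × Int)) (max_length : Int) (out : List String) : Prop := out = split_dict_by_max_length_alt input_dict max_length
instance (input_dict : List (String × Int)) (max_length : Int) (out : List String) : Decidable (Spec_split_dict_by_max_length input_dict max_length out) := by unfold Spec_split_dict_by_max_length; infer_instance

-- ===== CLAIM (what is proved, stated in full; the proofs are below) =====
def Claim_equal_split_dict_by_max_length : Prop := ∀ (input_dict : List (String × Int)) (max_length : Int), Dom_split_dict_by_max_length input_dict max_length → Pre_split_dict_by_max_length input_dict max_length → Spec_split_dict_by_max_length input_dict max_length (split_dict_by_max_length input_dict max_length)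

-- ===== LEMMAS AND PROOFS =====

lemma pv_join_append_singleton (sep : List Char) (xs : List (List Char)) (x : List Char)
    (h : xs ≠ []) :
    PySem.Chars.join sep (xs ++ [x]) = PySem.Chars.join sep xs ++ sep ++ x := by
  induction xs with
  | nil => exact absurd rfl h
  | cons a t ih =>
    cases t with
    | nil => simp [PySem.Chars.join_cons_cons, PySem.Chars.join_singleton]
    | cons b t' =>
      have h2 := ih (by simp)
      simp only [List.cons_append] at h2 ⊢
      simp only [PySem.Chars.join_cons_cons, h2, List.append_assoc]

-- length of str(chunk ∪ {p}) from length of str(chunk), p a fresh key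
lemma pv_lenD_append (l : List (String × Int)) (p : String × Int) :
    ((pvDictStr (l ++ [p])).length : Int)
      = ((pvDictStr l).length : Int) + ((pvItem p).length : Int)
        + (if (l.map pvItem).isEmpty then 0 else 2) := by
  cases l with
  | nil =>
    simp [pvDictStr, pvRender, PySem.Chars.join_singleton, PySem.Chars.join_nil]
    omega
  | cons a t =>
    rw [pvDictStr, pvDictStr, pvRender, pvRender, List.map_append]
    simp only [List.map_cons, List.map_nil]
    rw [pv_join_append_singleton [',', ' '] (pvItem a :: t.map pvItem) (pvItem p) (by simp)]
    simp [List.length_append]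
    omega

-- the finishing tail of each port, as functions of the final loop state
def pvOutA (st : List (PySem.Dict String Int) × PySem.Dict String Int) : List String :=
  (if st.2.items.isEmpty then st.1 else st.1 ++ [st.2]).map (fun d => String.ofList (pvDictStr d.items))

def pvOutB (st : List (List (List Char)) × List (List Char) × Int) : List String :=
  (if st.2.1.isEmpty then st.1 else st.1 ++ [st.2.1]).map (fun c => String.ofList (pvRender c))

-- main loop invariant: B's state mirrors A's (item strings of the current chunk,
-- its str()-length, and the rendered finished chunks), for fresh remaining keys
lemma pv_loop_agree (max_length : Int) :
    ∀ (rest : List (String × Int)) (resA : List (PySem.Dict String Int))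
      (cur : PySem.Dict String Int),
      (cur.items.map Prod.fst ++ rest.map Prod.fst).Nodup →
      pvOutA (List.foldl (pvStepA max_length) (resA, cur) rest)
        = pvOutB (List.foldl (pvStepB max_length)
            (resA.map (fun d => d.items.map pvItem), cur.items.map pvItem,
             ((pvDictStr cur.items).length : Int)) rest) := by
  intro rest
  induction rest with
  | nil =>
    intro resA cur _
    simp only [List.foldl_nil, pvOutA, pvOutB]
    split_ifs with h1 h2 h2 <;>
      simp_all [List.isEmpty_iff, List.map_append, pvDictStr]
  | cons kv rest' ih =>
    intro resA cur hnd
    have hfresh : kv.1 ∉ cur.items.map Prod.fst := by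
      have hdisj := (List.nodup_append.mp hnd).2.2
      intro hmem
      exact hdisj kv.1 hmem kv.1 (by simp) rfl
    have hcont : cur.contains kv.1 = false := by
      rw [PySem.Dict.contains_eq_decide_mem_keys]
      simpa [PySem.Dict.keys] using hfresh
    have hitems : (cur.insert kv.1 kv.2).items = cur.items ++ [kv] :=
      PySem.Dict.items_insert_of_not_contains cur kv.2 hcont
    simp only [List.foldl_cons]
    have hcond : (((pvDictStr (cur.insert kv.1 kv.2).items).length : Int) > max_length)
        = (((pvDictStr cur.items).length : Int) + ((pvItem kv).length : Int)
            + (if (cur.items.map pvItem).isEmpty then 0 else 2) > max_length) := by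
      rw [hitems, pv_lenD_append]
    by_cases hgt : ((pvDictStr (cur.insert kv.1 kv.2).items).length : Int) > max_length
    · -- flush branch in both
      have hgt' : ((pvDictStr cur.items).length : Int) + ((pvItem kv).length : Int)
          + (if (cur.items.map pvItem).isEmpty then 0 else 2) > max_length := hcond ▸ hgt
      rw [show pvStepA max_length (resA, cur) kv
            = (resA ++ [cur], PySem.Dict.empty.insert kv.1 kv.2) by
          simp only [pvStepA]; rw [if_pos hgt]]
      rw [show pvStepB max_length
            (resA.map (fun d => d.items.map pvItem), cur.items.map pvItem,
              ((pvDictStr cur.items).length : Int)) kv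
            = ((resA.map (fun d => d.items.map pvItem)) ++ [cur.items.map pvItem],
               ([pvItem kv], 2 + ((pvItem kv).length : Int))) by
          simp only [pvStepB]; rw [if_pos hgt']]
      have hsing : (PySem.Dict.empty.insert kv.1 kv.2).items = [kv] := by
        simpa using PySem.Dict.items_insert_of_not_contains
          (PySem.Dict.empty (κ := String) (ν := Int)) kv.2 (by simp)
      have hnd' : ((PySem.Dict.empty.insert kv.1 kv.2).items.map Prod.fst
          ++ rest'.map Prod.fst).Nodup := by
        rw [hsing]
        have h3 : (kv.1 :: rest'.map Prod.fst).Nodup := by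
          simpa using (List.nodup_append.mp hnd).2.1
        simpa using h3
      rw [ih (resA ++ [cur]) (PySem.Dict.empty.insert kv.1 kv.2) hnd', hsing]
      have hlen : ((pvDictStr [kv]).length : Int) = 2 + ((pvItem kv).length : Int) := by
        simp [pvDictStr, pvRender, PySem.Chars.join_singleton]
        omega
      simp [hlen]
    · -- keep branch in both
      have hle' : ¬ (((pvDictStr cur.items).length : Int) + ((pvItem kv).length : Int)
          + (if (cur.items.map pvItem).isEmpty then 0 else 2) > max_length) := hcond ▸ hgt
      rw [show pvStepA max_length (resA, cur) kv = (resA, cur.insert kv.1 kv.2) by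
          simp only [pvStepA]; rw [if_neg hgt]]
      rw [show pvStepB max_length
            (resA.map (fun d => d.items.map pvItem), cur.items.map pvItem,
              ((pvDictStr cur.items).length : Int)) kv
            = (resA.map (fun d => d.items.map pvItem),
               (cur.items.map pvItem ++ [pvItem kv],
                ((pvDictStr cur.items).length : Int) + ((pvItem kv).length : Int)
                  + (if (cur.items.map pvItem).isEmpty then 0 else 2))) by
          simp only [pvStepB]; rw [if_neg hle']]
      have hnd' : ((cur.insert kv.1 kv.2).items.map Prod.fst ++ rest'.map Prod.fst).Nodup := by
        rw [hitems]
        simpa [List.append_assoc] using hnd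
      rw [ih resA (cur.insert kv.1 kv.2) hnd']
      rw [hitems, pv_lenD_append]
      simp

-- ===== VERDICT (by name: the statement is the Claim_ definition above) =====
theorem split_dict_by_max_length_spec : Claim_equal_split_dict_by_max_length := by
  intro input_dict max_length _hdom hpre
  unfold Spec_split_dict_by_max_length
  unfold split_dict_by_max_length split_dict_by_max_length_alt
  have h := pv_loop_agree max_length input_dict []
    PySem.Dict.empty (by simpa [Pre_split_dict_by_max_length] using hpre)
  simpa [pvOutA, pvOutB, pvDictStr, pvRender, PySem.Chars.join_nil] using h
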